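-- pv_equiv track=rewrite | github.com/IllyaMikava/DCP_Labs | Week8Lab.py | analyze_character_words
-- ===== SOURCE A (Python) =====
-- import string
-- from collections import defaultdict
--
-- def clean_word(word):
--     """
--     Converts words to lowercase and removes punctuation
--     Returns the cleaned word
--     """
--     # Remove punctuation
--     word = word.translate(str.maketrans('', '', string.punctuation))
--     # Convert to lowercase
--     word = word.lower()
--     return word
--
-- def analyze_character_words(lines):
--     """Create nested dictionary of words used by each character"""
--     character_words = defaultdict(lambda: defaultdict(int))
--     current_character = None
--
--     exclude_words = {
--         'EXT', 'INT', 'CONTINUED', 'CONTD', 'DAY', 'NIGHT', 'MORNING',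
--         'EVENING', 'LATER', 'FADE', 'CUT', 'DISSOLVE', 'TO', 'IN', 'OUT',
--         'BLACK', 'BACK', 'THE', 'END', 'TITLE', 'CREDITS', 'SEQUENCE'
--     }
--
--     for line in lines:
--         stripped = line.strip()
--
--         # Check if this is a character name
--         if stripped and stripped.isupper():
--             stripped = stripped.split('(')[0].strip()
--             words = stripped.split()
--
--             if words and words[0] not in exclude_words and len(stripped) < 50:
--                 current_character = stripped
--         # If we have a current character and this is dialogue
--         elif current_character and stripped and not stripped.isupper():
--             words = stripped.split()
--             for word in words:
--                 cleaned = clean_word(word)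
--                 if cleaned:
--                     character_words[current_character][cleaned] += 1
--
--     return dict(character_words)
-- ===== SOURCE B (Python) =====
-- import string
--
--
-- def clean_word(word):
--     """Converts words to lowercase and removes punctuation (same helper as the original module)."""
--     word = word.translate(str.maketrans('', '', string.punctuation))
--     word = word.lower()
--     return word
--
--
-- EXCLUDE_WORDS = {
--     'EXT', 'INT', 'CONTINUED', 'CONTD', 'DAY', 'NIGHT', 'MORNING',
--     'EVENING', 'LATER', 'FADE', 'CUT', 'DISSOLVE', 'TO', 'IN', 'OUT',
--     'BLACK', 'BACK', 'THE', 'END', 'TITLE', 'CREDITS', 'SEQUENCE'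
-- }
--
--
-- def classify_line(line):
--     """('header', name) | ('dialogue', words) | ('skip', None)"""
--     s = line.strip()
--     if s and s.isupper():
--         name = s.split('(')[0].strip()
--         w = name.split()
--         if w and w[0] not in EXCLUDE_WORDS and len(name) < 50:
--             return ('header', name)
--         return ('skip', None)
--     if s:
--         return ('dialogue', s.split())
--     return ('skip', None)
--
--
-- def analyze_character_words(lines):
--     """Three passes: classify each line, forward-fill the active character, then count."""
--     # pass 1: classification
--     tags = [classify_line(line) for line in lines]
--     # pass 2: forward-fill the active character
--     filled = []
--     cur = None
--     for tag in tags: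
--         if tag[0] == 'header':
--             cur = tag[1]
--         filled.append((cur, tag))
--     # pass 3: count words of dialogue lines under their active character
--     result = {}
--     for cur, (kind, val) in filled:
--         if kind == 'dialogue' and cur is not None:
--             for word in val:
--                 cleaned = clean_word(word)
--                 if cleaned:
--                     counts = result.get(cur, {})
--                     counts[cleaned] = counts.get(cleaned, 0) + 1
--                     result[cur] = counts
--     return result
-- ===== Notes on version B (the rewrite author's own statement) =====
-- stated objective: alternative
-- what changed: A's single fused stateful loop (tracking the current character while mutating a nested defaultdict) is decomposed into three independent passes: per-line classification into header/dialogue/skip tags, forward-fill of the active character over the tags, then a counting pass over the filled list building the nested dict lazily.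
import Mathlib
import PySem

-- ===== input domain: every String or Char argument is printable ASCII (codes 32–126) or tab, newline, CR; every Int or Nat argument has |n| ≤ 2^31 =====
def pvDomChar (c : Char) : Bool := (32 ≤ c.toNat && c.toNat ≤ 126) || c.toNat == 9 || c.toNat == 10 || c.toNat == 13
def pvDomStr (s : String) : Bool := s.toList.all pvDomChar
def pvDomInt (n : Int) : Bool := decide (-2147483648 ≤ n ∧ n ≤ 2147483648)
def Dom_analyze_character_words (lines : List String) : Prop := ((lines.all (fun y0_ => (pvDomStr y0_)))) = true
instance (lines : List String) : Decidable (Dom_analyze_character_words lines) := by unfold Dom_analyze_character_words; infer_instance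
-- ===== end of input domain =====

-- B replaces A's fused stateful loop by three passes (classify, forward-fill the active character, count); alternative decomposition, same cost.

-- ===== shared helpers (Python builtins / the module-level clean_word helper, used verbatim by both sources) =====

-- string.punctuation
def pvPunct : List Char := "!\"#$%&'()*+,-./:;<=>?@[\\]^_`{|}~".toList

-- word.translate(str.maketrans('', '', string.punctuation)).lower(); the translate step is exactly
-- a filter deleting the punctuation characters.
def clean_word (word : String) : String :=
  PySem.Str.lower (String.ofList (word.toList.filter (fun c => !(pvPunct.contains c))))

-- s.isupper(): at least one cased character and no lowercase one; exact on the printable-ASCII domain,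
-- where the cased characters are exactly the letters.
def pvIsupper (s : String) : Bool :=
  s.toList.any PySem.Chars.isalpha && s.toList.all (fun c => !(PySem.Chars.islower c))

-- exclude_words (a set of distinct literals; membership is order-independent)
def pvExclude : List String :=
  ["EXT", "INT", "CONTINUED", "CONTD", "DAY", "NIGHT", "MORNING",
   "EVENING", "LATER", "FADE", "CUT", "DISSOLVE", "TO", "IN", "OUT",
   "BLACK", "BACK", "THE", "END", "TITLE", "CREDITS", "SEQUENCE"]

-- ===== PORT A =====

-- character_words[current_character][cleaned] += 1 on the nested defaultdict (outer access creates the inner dict)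
def pvStepWordA (cur : String) (d : PySem.Dict String (PySem.Dict String Int)) (word : String) :
    PySem.Dict String (PySem.Dict String Int) :=
  let cleaned := clean_word word
  if cleaned ≠ "" then
    d.modify cur PySem.Dict.empty (fun inner => inner.modify cleaned 0 (· + 1))
  else d

def pvStepLineA (st : PySem.Dict String (PySem.Dict String Int) × Option String) (line : String) :
    PySem.Dict String (PySem.Dict String Int) × Option String :=
  let stripped := PySem.Str.strip line
  if stripped ≠ "" ∧ pvIsupper stripped = true then
    let name := PySem.Str.strip (((PySem.Str.split? stripped "(").getD []).headD "")  -- split('(')[0]: always nonempty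
    let words := PySem.Str.split₀ name
    if words ≠ [] ∧ pvExclude.contains (words.headD "") = false ∧ PySem.Str.len name < 50 then
      (st.1, some name)
    else st
  else
    match st.2 with
    | some cur =>
        if stripped ≠ "" ∧ pvIsupper stripped = false then
          ((PySem.Str.split₀ stripped).foldl (pvStepWordA cur) st.1, st.2)
        else st
    | none => st

def analyze_character_words (lines : List String) : List (String × List (String × Int)) :=
  ((lines.foldl pvStepLineA (PySem.Dict.empty, none)).1.items).map (fun p => (p.1, p.2.items))

-- ===== PORT B =====

inductive PvTag where
  | header : String → PvTag
  | dialogue : List String → PvTag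
  | skip : PvTag
deriving DecidableEq, Repr

-- pass 1: classify_line
def pvClassifyLine (line : String) : PvTag :=
  let s := PySem.Str.strip line
  if s ≠ "" ∧ pvIsupper s = true then
    let name := PySem.Str.strip (((PySem.Str.split? s "(").getD []).headD "")
    let w := PySem.Str.split₀ name
    if w ≠ [] ∧ pvExclude.contains (w.headD "") = false ∧ PySem.Str.len name < 50 then
      PvTag.header name
    else PvTag.skip
  else if s ≠ "" then PvTag.dialogue (PySem.Str.split₀ s)
  else PvTag.skip

-- pass 2: forward-fill loop body
def pvFillStep (st : Option String × List (Option String × PvTag)) (t : PvTag) :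
    Option String × List (Option String × PvTag) :=
  let cur := match t with | PvTag.header n => some n | _ => st.1
  (cur, st.2 ++ [(cur, t)])

-- pass 3 inner word loop body (result.get / insert, lazy inner dict)
def pvCountWordB (cur : String) (d : PySem.Dict String (PySem.Dict String Int)) (word : String) :
    PySem.Dict String (PySem.Dict String Int) :=
  let cleaned := clean_word word
  if cleaned ≠ "" then
    let counts := d.getD cur PySem.Dict.empty
    let counts := counts.insert cleaned (counts.getD cleaned 0 + 1)
    d.insert cur counts
  else d

def pvCountLineB (d : PySem.Dict String (PySem.Dict String Int)) (p : Option String × PvTag) :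
    PySem.Dict String (PySem.Dict String Int) :=
  match p with
  | (some cur, PvTag.dialogue ws) => ws.foldl (pvCountWordB cur) d
  | _ => d

def analyze_character_words_alt (lines : List String) : List (String × List (String × Int)) :=
  -- pass 1: tags := lines.map classify; pass 2: forward-fill; pass 3: count
  (((((lines.map pvClassifyLine).foldl pvFillStep (none, [])).2).foldl pvCountLineB PySem.Dict.empty).items).map
    (fun p => (p.1, p.2.items))

-- ===== PRECONDITION & SPEC =====
def Spec_analyze_character_words (lines : List String) (out : List (String × List (String × Int))) : Prop := out = analyze_character_words_alt lines
instance (lines : List String) (out : List (String × List (String × Int))) : Decidable (Spec_analyze_character_words lines out) := by unfold Spec_analyze_character_words; infer_instance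

-- ===== CLAIM (what is proved, stated in full; the proofs are below) =====
def Claim_equal_analyze_character_words : Prop := ∀ (lines : List String), Dom_analyze_character_words lines → Spec_analyze_character_words lines (analyze_character_words lines)

-- ===== LEMMAS AND PROOFS =====

-- recursive form of the forward-fill pass
def pvFillRec (cur : Option String) : List PvTag → List (Option String × PvTag)
  | [] => []
  | t :: ts =>
      let c := match t with | PvTag.header n => some n | _ => cur
      (c, t) :: pvFillRec c ts

theorem pvFill_snd (ts : List PvTag) : ∀ (cur : Option String) (acc : List (Option String × PvTag)),
    (ts.foldl pvFillStep (cur, acc)).2 = acc ++ pvFillRec cur ts := by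
  induction ts with
  | nil => intro cur acc; simp [pvFillRec]
  | cons t ts ih =>
      intro cur acc
      simp only [List.foldl_cons, pvFillStep, pvFillRec, ih]
      simp

theorem pvWord_eq (cur : String) (d : PySem.Dict String (PySem.Dict String Int)) (word : String) :
    pvStepWordA cur d word = pvCountWordB cur d word := by
  simp only [pvStepWordA, pvCountWordB, PySem.Dict.modify]

theorem pvMain (lines : List String) : ∀ (d : PySem.Dict String (PySem.Dict String Int)) (cur : Option String),
    (lines.foldl pvStepLineA (d, cur)).1 =
      (pvFillRec cur (lines.map pvClassifyLine)).foldl pvCountLineB d := by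
  induction lines with
  | nil => intro d cur; simp [pvFillRec]
  | cons line rest ih =>
      intro d cur
      simp only [List.foldl_cons, List.map_cons]
      by_cases h1 : PySem.Str.strip line ≠ "" ∧ pvIsupper (PySem.Str.strip line) = true
      · by_cases h2 : PySem.Str.split₀ (PySem.Str.strip (((PySem.Str.split? (PySem.Str.strip line) "(").getD []).headD "")) ≠ [] ∧
            pvExclude.contains ((PySem.Str.split₀ (PySem.Str.strip (((PySem.Str.split? (PySem.Str.strip line) "(").getD []).headD ""))).headD "") = false ∧
            PySem.Str.len (PySem.Str.strip (((PySem.Str.split? (PySem.Str.strip line) "(").getD []).headD "")) < 50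
        · -- qualifying header
          rw [show pvStepLineA (d, cur) line =
                (d, some (PySem.Str.strip (((PySem.Str.split? (PySem.Str.strip line) "(").getD []).headD ""))) by
              simp only [pvStepLineA]; rw [if_pos h1, if_pos h2]]
          rw [show pvClassifyLine line =
                PvTag.header (PySem.Str.strip (((PySem.Str.split? (PySem.Str.strip line) "(").getD []).headD "")) by
              simp only [pvClassifyLine]; rw [if_pos h1, if_pos h2]]
          rw [ih]
          simp [pvFillRec, pvCountLineB]
        · -- non-qualifying uppercase line: skip, cur unchanged
          rw [show pvStepLineA (d, cur) line = (d, cur) by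
              simp only [pvStepLineA]; rw [if_pos h1, if_neg h2]]
          rw [show pvClassifyLine line = PvTag.skip by
              simp only [pvClassifyLine]; rw [if_pos h1, if_neg h2]]
          rw [ih]
          simp [pvFillRec, pvCountLineB]
      · by_cases hs : PySem.Str.strip line = ""
        · -- blank line: skip
          rw [show pvStepLineA (d, cur) line = (d, cur) by
              simp only [pvStepLineA]; rw [if_neg h1]
              cases cur with
              | none => rfl
              | some c => simp [hs]]
          rw [show pvClassifyLine line = PvTag.skip by
              simp only [pvClassifyLine]; rw [if_neg h1, if_neg (by simp [hs])]]
          rw [ih]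
          simp [pvFillRec, pvCountLineB]
        · -- dialogue line (nonempty, not isupper)
          have hu : pvIsupper (PySem.Str.strip line) = false := by
            by_contra hne
            exact h1 ⟨hs, by simpa using hne⟩
          rw [show pvClassifyLine line = PvTag.dialogue (PySem.Str.split₀ (PySem.Str.strip line)) by
              simp only [pvClassifyLine]; rw [if_neg h1, if_pos hs]]
          cases cur with
          | none =>
              rw [show pvStepLineA (d, none) line = (d, none) by
                  simp only [pvStepLineA]; rw [if_neg h1]]
              rw [ih]
              simp [pvFillRec, pvCountLineB]
          | some c =>
              rw [show pvStepLineA (d, some c) line =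
                    ((PySem.Str.split₀ (PySem.Str.strip line)).foldl (pvStepWordA c) d, some c) by
                  simp only [pvStepLineA]; rw [if_neg h1]
                  exact if_pos ⟨hs, hu⟩]
              rw [ih]
              simp only [pvFillRec, List.foldl_cons, pvCountLineB]
              rw [show pvStepWordA c = pvCountWordB c from
                    funext fun d => funext fun w => pvWord_eq c d w]

-- ===== VERDICT (by name: the statement is the Claim_ definition above) =====
theorem analyze_character_words_spec : Claim_equal_analyze_character_words := by
  intro lines _
  unfold Spec_analyze_character_words analyze_character_words analyze_character_words_alt
  rw [pvMain, pvFill_snd]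
  simp
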